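-- pv_equiv track=rewrite | github.com/swisskanton/javascript | countThePhotos.py | count_photos
-- ===== SOURCE A (Python) =====
-- def count_photos(road):
--     count = [0, 0, 0, 0, 0]
--     for i in range(len(road)):
--         if road[i] == '>':
--             count[1] += 1
--         if road[i] == '<':
--             count[2] += 1
--             count[0] += count[4]
--         if road[i] == '.':
--             count[0] += count[1]
--             count[4] += 1
--             count[3] += 1 if count[1] > 0 else 1
--     return count[0]
-- ===== SOURCE B (Python) =====
-- def count_photos(road):
--     # Stage 1: annotate every position with the prefix counts of '>' and '<'
--     # strictly before it; the loop's final lt is the total number of '<'.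
--     prefixes = []
--     g = lt = 0
--     for ch in road:
--         prefixes.append((ch, g, lt))
--         g += ch == '>'
--         lt += ch == '<'
--     total_lt = lt
--     # Stage 2: closed per-dot formula — each '.' photographs every '>' before
--     # it and every '<' after it (total '<' minus those before it).
--     return sum(gb + (total_lt - lb) for ch, gb, lb in prefixes if ch == '.')
-- ===== Notes on version B (the rewrite author's own statement) =====
-- stated objective: alternative
-- what changed: B is a two-stage computation: a first pass builds per-position prefix counts of '>' and '<', then a second pass sums a closed per-dot formula gt_before + (total_lt - lt_before), instead of A's single on-line pass mutating a five-slot counter array.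
import Mathlib
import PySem

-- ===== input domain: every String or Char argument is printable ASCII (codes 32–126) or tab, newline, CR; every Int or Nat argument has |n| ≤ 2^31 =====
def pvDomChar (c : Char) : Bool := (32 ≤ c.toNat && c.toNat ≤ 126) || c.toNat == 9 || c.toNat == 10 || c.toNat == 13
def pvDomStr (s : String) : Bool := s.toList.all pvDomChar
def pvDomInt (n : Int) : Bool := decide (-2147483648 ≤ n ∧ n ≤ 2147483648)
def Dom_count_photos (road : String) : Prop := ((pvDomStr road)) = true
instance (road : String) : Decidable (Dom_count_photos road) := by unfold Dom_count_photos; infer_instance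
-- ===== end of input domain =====

-- B replaces A's single on-line pass over a five-slot counter array by two staged passes:
-- prefix-count annotation, then a closed per-dot formula; objective: alternative, same cost.

-- ===== PORT A =====
-- A's loop body: three independent ifs updating the 5-slot counter list, kept in order.
def pvStepA (s : Int × Int × Int × Int × Int) (c : Char) : Int × Int × Int × Int × Int :=
  let s1 := if c = '>' then (s.1, s.2.1 + 1, s.2.2.1, s.2.2.2.1, s.2.2.2.2) else s
  let s2 := if c = '<' then (s1.1 + s1.2.2.2.2, s1.2.1, s1.2.2.1 + 1, s1.2.2.2.1, s1.2.2.2.2) else s1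
  let s3 := if c = '.' then (s2.1 + s2.2.1, s2.2.1, s2.2.2.1,
                             s2.2.2.2.1 + (if s2.2.1 > 0 then 1 else 1), s2.2.2.2.2 + 1) else s2
  s3

def count_photos (road : String) : Int :=
  (road.toList.foldl pvStepA (0, 0, 0, 0, 0)).1

-- ===== PORT B =====
-- Stage 1: annotate each position with (char, #'>' strictly before, #'<' strictly before);
-- also return the loop's final (g, lt) accumulators (lt = total number of '<').
def pvStage1 (l : List Char) (g lt : Int) : List (Char × Int × Int) × Int × Int :=
  match l with
  | [] => ([], g, lt)
  | c :: t =>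
      let r := pvStage1 t (g + if c = '>' then 1 else 0) (lt + if c = '<' then 1 else 0)
      ((c, g, lt) :: r.1, r.2)

-- Stage 2: sum the per-dot closed formula gt_before + (total_lt - lt_before).
def count_photos_alt (road : String) : Int :=
  let r := pvStage1 road.toList 0 0
  (r.1.filter (fun p => p.1 = '.')).foldl (fun acc p => acc + (p.2.1 + (r.2.2 - p.2.2))) 0

-- ===== PRECONDITION & SPEC =====
def Spec_count_photos (road : String) (out : Int) : Prop := out = count_photos_alt road
instance (road : String) (out : Int) : Decidable (Spec_count_photos road out) := by unfold Spec_count_photos; infer_instance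

-- ===== CLAIM (what is proved, stated in full; the proofs are below) =====
def Claim_equal_count_photos : Prop := ∀ (road : String), Dom_count_photos road → Spec_count_photos road (count_photos road)

-- ===== LEMMAS AND PROOFS =====

-- Mediating recursive function: pvM l = (pairs in l, #'.' in l, #'<' in l), via suffix counts.
def pvM (l : List Char) : Int × Int × Int :=
  match l with
  | [] => (0, 0, 0)
  | c :: t =>
      let r := pvM t
      if c = '>' then (r.1 + r.2.1, r.2.1, r.2.2)
      else if c = '.' then (r.1 + r.2.2, r.2.1 + 1, r.2.2)
      else if c = '<' then (r.1, r.2.1, r.2.2 + 1)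
      else r

-- A-side invariant: slot 0 after the fold gains s.1·dots + s.4·lts + pairs(l).
theorem pv_main (l : List Char) (s : Int × Int × Int × Int × Int) :
    (l.foldl pvStepA s).1
      = s.1 + s.2.1 * (pvM l).2.1 + s.2.2.2.2 * (pvM l).2.2 + (pvM l).1 := by
  induction l generalizing s with
  | nil => simp [pvM]
  | cons c t ih =>
      simp only [List.foldl_cons, ih]
      by_cases h1 : c = '>'
      · simp [pvM, pvStepA, h1]; ring
      · by_cases h2 : c = '.'
        · simp [pvM, pvStepA, h2]; ring
        · by_cases h3 : c = '<'
          · simp [pvM, pvStepA, h3]; ring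
          · simp [pvM, pvStepA, h1, h2, h3]

-- Stage-1 final lt accumulator counts the '<' of l.
theorem pv_stage1_lt (l : List Char) (g lt : Int) :
    (pvStage1 l g lt).2.2 = lt + (pvM l).2.2 := by
  induction l generalizing g lt with
  | nil => simp [pvStage1, pvM]
  | cons c t ih =>
      by_cases h1 : c = '>'
      · simp [pvStage1, pvM, h1, ih]
      · by_cases h2 : c = '.'
        · simp [pvStage1, pvM, h2, ih]
        · by_cases h3 : c = '<'
          · simp [pvStage1, pvM, h3, ih]; ring
          · simp [pvStage1, pvM, h1, h2, h3, ih]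

-- B-side invariant: the stage-2 sum over the annotated list, with an arbitrary
-- total T and accumulator acc, in terms of pvM of the suffix.
theorem pv_bsum (l : List Char) (g lt T acc : Int) :
    (((pvStage1 l g lt).1.filter (fun p => p.1 = '.')).foldl
        (fun a p => a + (p.2.1 + (T - p.2.2))) acc)
      = acc + (g + T - lt - (pvM l).2.2) * (pvM l).2.1 + (pvM l).1 := by
  induction l generalizing g lt acc with
  | nil => simp [pvStage1, pvM]
  | cons c t ih =>
      by_cases h1 : c = '>'
      · simp [pvStage1, pvM, h1]; rw [ih]; ring
      · by_cases h2 : c = '.'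
        · simp [pvStage1, pvM, h2]; rw [ih]; ring
        · by_cases h3 : c = '<'
          · simp [pvStage1, pvM, h3]; rw [ih]; ring
          · simp [pvStage1, pvM, h1, h2, h3]; rw [ih]

-- ===== VERDICT (by name: the statement is the Claim_ definition above) =====
theorem count_photos_spec : Claim_equal_count_photos := by
  intro road _
  unfold Spec_count_photos count_photos count_photos_alt
  rw [pv_main, pv_bsum, pv_stage1_lt]
  ring
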